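-- pv_equiv track=rewrite | github.com/alexmqth/local_github | verl-release-v0.6.1/scripts/casual_math_gen.py | split_solution_into_steps
-- ===== SOURCE A (Python) =====
-- from typing import List, Dict, Any, Optional, Tuple, Protocol, Union, overload
--
-- def split_solution_into_steps(solution_text: str) -> List[str]:
--     """
--     Preserve original wording as much as possible:
--     - split by line breaks first
--     - further split by sentence boundary '. ' ONLY if the boundary is OUTSIDE LaTeX math environments
--     """
--
--     def _split_sentences_outside_math(s: str) -> List[str]:
--         """
--         Split on ".<spaces>" boundaries only when we are NOT inside common LaTeX math environments.
--         This is a heuristic, but avoids common failure cases where LaTeX symbols/commands contain periods.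
--
--         Supported math delimiters (best-effort):
--         - \\[ ... \\]
--         - \\( ... \\)
--         - $$ ... $$
--         - $ ... $   (very heuristic; assumes $ is not escaped)
--         """
--         if not s:
--             return []
--         out: List[str] = []
--         buf: List[str] = []
--
--         in_dollar = False       # $...$
--         in_dollars2 = False     # $$...$$
--         in_bracket = False      # \[...\]
--         in_paren = False        # \(...\)
--
--         i = 0
--         n = len(s)
--         while i < n:
--             ch = s[i]
--
--             # Detect \[ \] \( \)
--             if ch == "\\" and i + 1 < n:
--                 nxt = s[i + 1]
--                 if not (in_dollar or in_dollars2):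
--                     if nxt == "[":
--                         in_bracket = True
--                     elif nxt == "]":
--                         in_bracket = False
--                     elif nxt == "(":
--                         in_paren = True
--                     elif nxt == ")":
--                         in_paren = False
--                 buf.append(ch)
--                 buf.append(nxt)
--                 i += 2
--                 continue
--
--             # Detect $$ ... $$
--             if ch == "$":
--                 if i + 1 < n and s[i + 1] == "$":
--                     in_dollars2 = not in_dollars2
--                     buf.append("$$")
--                     i += 2
--                     continue
--                 # Detect $ ... $
--                 if not in_dollars2:
--                     in_dollar = not in_dollar
--                 buf.append(ch)
--                 i += 1
--                 continue
--
--             # Split on ".<spaces>" only outside math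
--             if (
--                 ch == "."
--                 and (i == 0 or s[i - 1] != "\\")
--                 and not (in_dollar or in_dollars2 or in_bracket or in_paren)
--             ):
--                 j = i + 1
--                 # require at least one whitespace to be a sentence boundary (match old regex intent)
--                 if j < n and s[j].isspace():
--                     # consume all whitespace after dot
--                     while j < n and s[j].isspace():
--                         j += 1
--                     piece = "".join(buf).strip()
--                     if piece:
--                         out.append(piece)
--                     buf = []
--                     i = j
--                     continue
--
--             buf.append(ch)
--             i += 1
--
--         last = "".join(buf).strip()
--         if last:
--             out.append(last)
--         return out
--
--     # Split by newlines first; then only split sentences OUTSIDE math.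
--     lines = [ln.strip() for ln in solution_text.splitlines() if ln.strip()]
--     steps: List[str] = []
--     for ln in lines:
--         parts = _split_sentences_outside_math(ln)
--         steps.extend(parts)
--     return steps
-- ===== SOURCE B (Python) =====
-- from typing import List
--
-- def split_solution_into_steps(solution_text: str) -> List[str]:
--     """Two-phase variant: first compute the cut positions (sentence boundaries
--     outside math), then build the pieces by slicing."""
--
--     def _cut_positions(s: str):
--         """Return the list of (dot_index, resume_index) sentence cuts of s."""
--         cuts = []
--         in_dollar = in_dollars2 = in_bracket = in_paren = False
--         i, n = 0, len(s)
--         while i < n: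
--             ch = s[i]
--             if ch == "\\" and i + 1 < n:
--                 if not (in_dollar or in_dollars2):
--                     nxt = s[i + 1]
--                     if nxt == "[":
--                         in_bracket = True
--                     elif nxt == "]":
--                         in_bracket = False
--                     elif nxt == "(":
--                         in_paren = True
--                     elif nxt == ")":
--                         in_paren = False
--                 i += 2
--             elif ch == "$":
--                 if i + 1 < n and s[i + 1] == "$":
--                     in_dollars2 = not in_dollars2
--                     i += 2
--                 else:
--                     if not in_dollars2:
--                         in_dollar = not in_dollar
--                     i += 1
--             elif (ch == "."
--                   and (i == 0 or s[i - 1] != "\\")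
--                   and not (in_dollar or in_dollars2 or in_bracket or in_paren)
--                   and i + 1 < n and s[i + 1].isspace()):
--                 j = i + 1
--                 while j < n and s[j].isspace():
--                     j += 1
--                 cuts.append((i, j))
--                 i = j
--             else:
--                 i += 1
--         return cuts
--
--     steps: List[str] = []
--     for ln in solution_text.splitlines():
--         ln = ln.strip()
--         if not ln:
--             continue
--         start = 0
--         pieces = []
--         for (c, r) in _cut_positions(ln):
--             pieces.append(ln[start:c].strip())
--             start = r
--         pieces.append(ln[start:].strip())
--         steps.extend(p for p in pieces if p)
--     return steps
-- ===== Notes on version B (the rewrite author's own statement) =====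
-- stated objective: alternative
-- what changed: A splits each line in one fused scan that grows a character buffer and emits stripped pieces inline; B first computes only the (dot, resume) cut positions with the delimiter walk, then builds the pieces in a separate phase by slicing the line at those positions and stripping/filtering the slices.
import Mathlib
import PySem

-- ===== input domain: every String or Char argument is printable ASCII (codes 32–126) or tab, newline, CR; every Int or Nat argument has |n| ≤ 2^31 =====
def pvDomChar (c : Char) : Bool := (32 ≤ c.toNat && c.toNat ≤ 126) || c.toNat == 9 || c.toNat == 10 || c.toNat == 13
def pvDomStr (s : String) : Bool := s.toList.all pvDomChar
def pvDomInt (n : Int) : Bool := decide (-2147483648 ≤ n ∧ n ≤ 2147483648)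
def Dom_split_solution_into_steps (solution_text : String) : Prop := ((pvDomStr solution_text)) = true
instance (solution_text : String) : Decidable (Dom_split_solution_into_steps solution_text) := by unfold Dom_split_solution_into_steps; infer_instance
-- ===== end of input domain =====

-- B replaces A's fused scan (character buffer + output list built in one loop) by two phases:
-- first compute only the cut positions, then build the pieces by slicing; objective: alternative decomposition.

-- the inner `while j < n and s[j].isspace(): j += 1` loop of both Pythons (fuel-bounded index walk)
def pvSkipWs (s : List Char) (fuel j : Nat) : Nat :=
  match fuel with
  | 0 => j
  | f + 1 =>
    if (s[j]?.map PySem.Chars.isspace).getD false then pvSkipWs s f (j + 1) else j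

-- ===== PORT A =====
-- the `while i < n` loop of A's `_split_sentences_outside_math`, state = (i, four flags, buf, out)
def pvScanA (s : List Char) (n : Nat) (fuel : Nat) (i : Nat)
    (d d2 br pr : Bool) (buf : List Char) (out : List String) : List String :=
  match fuel with
  | 0 =>
    let last := PySem.Chars.strip buf
    if last ≠ [] then out ++ [String.ofList last] else out
  | f + 1 =>
    if i < n then
      let ch := s.getD i ' '
      if ch = '\\' ∧ i + 1 < n then
        let nxt := s.getD (i + 1) ' '
        let bp : Bool × Bool :=
          if ¬ (d ∨ d2) then
            if nxt = '[' then (true, pr)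
            else if nxt = ']' then (false, pr)
            else if nxt = '(' then (br, true)
            else if nxt = ')' then (br, false)
            else (br, pr)
          else (br, pr)
        pvScanA s n f (i + 2) d d2 bp.1 bp.2 (buf ++ [ch, nxt]) out
      else if ch = '$' then
        if s[i + 1]? = some '$' then
          pvScanA s n f (i + 2) d (!d2) br pr (buf ++ ['$', '$']) out
        else
          pvScanA s n f (i + 1) (if ¬ d2 then !d else d) d2 br pr (buf ++ [ch]) out
      else if ch = '.' ∧ (i = 0 ∨ s.getD (i - 1) ' ' ≠ '\\') ∧ ¬ (d ∨ d2 ∨ br ∨ pr) then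
        if (s[i + 1]?.map PySem.Chars.isspace).getD false then
          let j := pvSkipWs s n (i + 1)
          let piece := PySem.Chars.strip buf
          pvScanA s n f j d d2 br pr []
            (if piece ≠ [] then out ++ [String.ofList piece] else out)
        else
          pvScanA s n f (i + 1) d d2 br pr (buf ++ [ch]) out
      else
        pvScanA s n f (i + 1) d d2 br pr (buf ++ [ch]) out
    else
      let last := PySem.Chars.strip buf
      if last ≠ [] then out ++ [String.ofList last] else out

def pvSplitSentA (s : List Char) : List String :=
  if s = [] then [] else pvScanA s s.length s.length 0 false false false false [] []

def split_solution_into_steps (solution_text : String) : List String :=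
  let lines := ((PySem.Str.splitlines solution_text).map PySem.Str.strip).filter (· ≠ "")
  lines.foldl (fun steps ln => steps ++ pvSplitSentA ln.toList) []

-- ===== PORT B =====
-- phase 1 of B: the same delimiter walk, but producing only the (dot, resume) cut positions
def pvCutsB (s : List Char) (n : Nat) (fuel : Nat) (i : Nat)
    (d d2 br pr : Bool) : List (Nat × Nat) :=
  match fuel with
  | 0 => []
  | f + 1 =>
    if i < n then
      let ch := s.getD i ' '
      if ch = '\\' ∧ i + 1 < n then
        let nxt := s.getD (i + 1) ' '
        let bp : Bool × Bool :=
          if ¬ (d ∨ d2) then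
            if nxt = '[' then (true, pr)
            else if nxt = ']' then (false, pr)
            else if nxt = '(' then (br, true)
            else if nxt = ')' then (br, false)
            else (br, pr)
          else (br, pr)
        pvCutsB s n f (i + 2) d d2 bp.1 bp.2
      else if ch = '$' then
        if s[i + 1]? = some '$' then
          pvCutsB s n f (i + 2) d (!d2) br pr
        else
          pvCutsB s n f (i + 1) (if ¬ d2 then !d else d) d2 br pr
      else if ch = '.' ∧ (i = 0 ∨ s.getD (i - 1) ' ' ≠ '\\') ∧ ¬ (d ∨ d2 ∨ br ∨ pr)
              ∧ (s[i + 1]?.map PySem.Chars.isspace).getD false then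
        let j := pvSkipWs s n (i + 1)
        (i, j) :: pvCutsB s n f j d d2 br pr
      else
        pvCutsB s n f (i + 1) d d2 br pr
    else []

-- phase 2 of B: slice the line at the cuts and strip each slice
def pvPiecesB (s : List Char) (start : Nat) : List (Nat × Nat) → List (List Char)
  | [] => [PySem.Chars.strip (PySem.List.slice s (some (start : Int)) none)]
  | (c, r) :: rest =>
    PySem.Chars.strip (PySem.List.slice s (some (start : Int)) (some (c : Int)))
      :: pvPiecesB s r rest

def split_solution_into_steps_alt (solution_text : String) : List String :=
  (PySem.Str.splitlines solution_text).foldl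
    (fun steps ln =>
      let l := (PySem.Str.strip ln).toList
      if l = [] then steps
      else
        let pieces := pvPiecesB l 0 (pvCutsB l l.length l.length 0 false false false false)
        steps ++ (pieces.filter (· ≠ [])).map String.ofList)
    []

-- ===== PRECONDITION & SPEC =====
def Spec_split_solution_into_steps (solution_text : String) (out : List String) : Prop := out = split_solution_into_steps_alt solution_text
instance (solution_text : String) (out : List String) : Decidable (Spec_split_solution_into_steps solution_text out) := by unfold Spec_split_solution_into_steps; infer_instance

-- ===== CLAIM (what is proved, stated in full; the proofs are below) =====
def Claim_equal_split_solution_into_steps : Prop := ∀ (solution_text : String), Dom_split_solution_into_steps solution_text → Spec_split_solution_into_steps solution_text (split_solution_into_steps solution_text)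

-- ===== LEMMAS AND PROOFS =====

lemma pvSkipWs_ge (s : List Char) (fuel j : Nat) : j ≤ pvSkipWs s fuel j := by
  induction fuel generalizing j with
  | zero => simp [pvSkipWs]
  | succ f ih =>
    simp only [pvSkipWs]
    split
    · exact le_trans (Nat.le_succ j) (ih (j + 1))
    · exact le_refl j

-- one scanned character extends the buffer-as-slice by s.getD i ' '
lemma pvTakeDropSucc (s : List Char) (start i : Nat) (h1 : start ≤ i) (h2 : i < s.length) :
    (s.drop start).take (i + 1 - start) = (s.drop start).take (i - start) ++ [s.getD i ' '] := by
  have e : i + 1 - start = (i - start) + 1 := by omega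
  rw [e, List.take_add_one]
  have : (s.drop start)[i - start]? = s[i]? := by
    rw [List.getElem?_drop]; congr 1; omega
  rw [this, List.getElem?_eq_getElem h2]
  simp [List.getD, List.getElem?_eq_getElem h2]

-- A's finish step equals B's last-piece step
lemma pvFinishEq (s : List Char) (start i : Nat) (h : s.length ≤ i) (out : List String) :
    (let last := PySem.Chars.strip ((s.drop start).take (i - start));
     if last ≠ [] then out ++ [String.ofList last] else out)
      = out ++ (((pvPiecesB s start []).filter (· ≠ [])).map String.ofList) := by
  have hb : (s.drop start).take (i - start) = s.drop start := by
    apply List.take_of_length_le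
    simp [List.length_drop]; omega
  simp only [pvPiecesB, PySem.List.slice_from_natCast, hb, List.filter]
  by_cases hc : PySem.Chars.strip (s.drop start) = [] <;> simp [hc]

-- core invariant: A's fused scan from (i, buf = s[start:i], out) equals out ++ B's pieces from the cuts
lemma pvScan_eq_cuts (s : List Char) (fuel : Nat) :
    ∀ (i start : Nat) (d d2 br pr : Bool) (out : List String),
      start ≤ i → s.length ≤ i + fuel →
      pvScanA s s.length fuel i d d2 br pr ((s.drop start).take (i - start)) out
        = out ++ (((pvPiecesB s start (pvCutsB s s.length fuel i d d2 br pr)).filter (· ≠ [])).map String.ofList) := by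
  induction fuel with
  | zero =>
    intro i start d d2 br pr out h1 h2
    simpa [pvScanA, pvCutsB] using pvFinishEq s start i (by omega) out
  | succ f ih =>
    intro i start d d2 br pr out h1 h2
    by_cases hin : i < s.length
    · simp only [pvScanA, pvCutsB, if_pos hin]
      set ch := s.getD i ' ' with hch
      by_cases hbs : ch = '\\' ∧ i + 1 < s.length
      · simp only [if_pos hbs]
        have e2 : (s.drop start).take (i + 2 - start)
            = (s.drop start).take (i - start) ++ [ch, s.getD (i + 1) ' '] := by
          have := pvTakeDropSucc s start i h1 hin
          have h2' := pvTakeDropSucc s start (i + 1) (by omega) hbs.2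
          have e : i + 1 + 1 - start = i + 2 - start := by omega
          rw [e] at h2'
          rw [h2', this, hch, List.append_assoc]; rfl
        rw [← e2]
        exact ih (i + 2) start _ _ _ _ out (by omega) (by omega)
      · simp only [if_neg hbs]
        by_cases hd : ch = '$'
        · simp only [if_pos hd]
          by_cases hdd : s[i + 1]? = some '$'
          · simp only [if_pos hdd]
            have hi1 : i + 1 < s.length := by
              by_contra hc
              rw [List.getElem?_eq_none (by omega)] at hdd; simp at hdd
            have hv : s.getD (i + 1) ' ' = '$' := by
              simp [List.getD, hdd]
            have e2 : (s.drop start).take (i + 2 - start)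
                = (s.drop start).take (i - start) ++ ['$', '$'] := by
              have t1 := pvTakeDropSucc s start i h1 hin
              have t2 := pvTakeDropSucc s start (i + 1) (by omega) hi1
              have e : i + 1 + 1 - start = i + 2 - start := by omega
              rw [e] at t2
              rw [t2, t1, ← hch, hd, hv, List.append_assoc]; rfl
            rw [← e2]
            exact ih (i + 2) start _ _ _ _ out (by omega) (by omega)
          · simp only [if_neg hdd]
            have e1 : (s.drop start).take (i + 1 - start)
                = (s.drop start).take (i - start) ++ [ch] := pvTakeDropSucc s start i h1 hin
            rw [← e1]
            exact ih (i + 1) start _ _ _ _ out (by omega) (by omega)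
        · simp only [if_neg hd]
          by_cases hdot : ch = '.' ∧ (i = 0 ∨ s.getD (i - 1) ' ' ≠ '\\') ∧ ¬ (d ∨ d2 ∨ br ∨ pr)
          · by_cases hws : (s[i + 1]?.map PySem.Chars.isspace).getD false = true
            · simp only [if_pos hdot, if_pos hws, if_pos (And.intro hdot.1 (And.intro hdot.2.1 (And.intro hdot.2.2 hws)))]
              set j := pvSkipWs s s.length (i + 1) with hj
              have hjge : i + 1 ≤ j := pvSkipWs_ge s s.length (i + 1)
              have hrec := ih j j d d2 br pr
                (if PySem.Chars.strip ((s.drop start).take (i - start)) ≠ [] then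
                    out ++ [String.ofList (PySem.Chars.strip ((s.drop start).take (i - start)))]
                  else out)
                (le_refl j) (by omega)
              simp only [Nat.sub_self, List.take_zero] at hrec
              rw [hrec]
              simp only [pvPiecesB, PySem.List.slice_natCast, List.filter]
              by_cases hpc : PySem.Chars.strip ((s.drop start).take (i - start)) = []
              · simp [hpc]
              · simp [hpc]
            · have hcond : ¬ (ch = '.' ∧ (i = 0 ∨ s.getD (i - 1) ' ' ≠ '\\') ∧ ¬ (d ∨ d2 ∨ br ∨ pr)
                  ∧ (s[i + 1]?.map PySem.Chars.isspace).getD false = true) := by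
                intro hc; exact hws hc.2.2.2
              simp only [if_pos hdot, if_neg hws]
              have e1 : (s.drop start).take (i + 1 - start)
                  = (s.drop start).take (i - start) ++ [ch] := pvTakeDropSucc s start i h1 hin
              rw [← e1, if_neg hcond]
              exact ih (i + 1) start _ _ _ _ out (by omega) (by omega)
          · have hcond : ¬ (ch = '.' ∧ (i = 0 ∨ s.getD (i - 1) ' ' ≠ '\\') ∧ ¬ (d ∨ d2 ∨ br ∨ pr)
                ∧ (s[i + 1]?.map PySem.Chars.isspace).getD false = true) := by
              intro hc; exact hdot ⟨hc.1, hc.2.1, hc.2.2.1⟩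
            simp only [if_neg hdot, if_neg hcond]
            have e1 : (s.drop start).take (i + 1 - start)
                = (s.drop start).take (i - start) ++ [ch] := pvTakeDropSucc s start i h1 hin
            rw [← e1]
            exact ih (i + 1) start _ _ _ _ out (by omega) (by omega)
    · simp only [pvScanA, pvCutsB, if_neg hin]
      simpa using pvFinishEq s start i (by omega) out

-- per-line agreement
lemma pvLine_eq (l : List Char) :
    pvSplitSentA l
      = ((pvPiecesB l 0 (pvCutsB l l.length l.length 0 false false false false)).filter (· ≠ [])).map String.ofList := by
  by_cases hl : l = []
  · subst hl
    simp [pvSplitSentA, pvCutsB, pvPiecesB, PySem.Chars.strip, PySem.Chars.rstrip, PySem.Chars.lstrip]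
  · have := pvScan_eq_cuts l l.length 0 0 false false false false []
      (le_refl 0) (by omega)
    simpa [pvSplitSentA, hl] using this

-- A's filtered-lines fold equals B's fold with the emptiness test inside
lemma pvFold_eq (ls : List String) (acc : List String) :
    ((ls.map PySem.Str.strip).filter (· ≠ "")).foldl (fun steps ln => steps ++ pvSplitSentA ln.toList) acc
      = ls.foldl
          (fun steps ln =>
            let l := (PySem.Str.strip ln).toList
            if l = [] then steps
            else
              let pieces := pvPiecesB l 0 (pvCutsB l l.length l.length 0 false false false false)
              steps ++ (pieces.filter (· ≠ [])).map String.ofList)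
          acc := by
  induction ls generalizing acc with
  | nil => rfl
  | cons x xs ih =>
    simp only [List.map_cons, List.filter_cons, List.foldl_cons]
    by_cases hx : (PySem.Str.strip x).toList = []
    · have hx' : PySem.Str.strip x = "" := String.toList_eq_nil_iff.mp hx
      simp only [hx', ne_eq, not_true_eq_false, decide_false]
      exact ih acc
    · have hx' : decide (PySem.Str.strip x ≠ "") = true := by
        simp only [ne_eq, decide_not, Bool.not_eq_true', decide_eq_false_iff_not]
        intro hc; rw [hc] at hx; exact hx rfl
      simp only [hx', if_true, List.foldl_cons, if_neg hx]
      rw [pvLine_eq]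
      exact ih _

-- ===== VERDICT (by name: the statement is the Claim_ definition above) =====
theorem split_solution_into_steps_spec : Claim_equal_split_solution_into_steps := by
  intro t _hd
  unfold Spec_split_solution_into_steps split_solution_into_steps split_solution_into_steps_alt
  exact pvFold_eq (PySem.Str.splitlines t) []
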